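-- pv_equiv track=rewrite | github.com/crzeller11/RandomLyricGenerator | project_2revised2.py | build_bigrams
-- ===== SOURCE A (Python) =====
-- def build_bigrams(lines):
--     outer_dict = {}
--     for line in lines:
--         old_word = '::END::'
--         line.append('::END::')
--         for word in line:
--             first_word = old_word
--             second_word = word
--             old_word = second_word
--             if (first_word,) not in outer_dict:
--                 outer_dict[(first_word,)] = {}
--             if second_word in outer_dict[(first_word,)]:
--                 outer_dict[(first_word,)][second_word] += 1
--             if second_word not in outer_dict[(first_word,)]:
--                 outer_dict[(first_word,)][second_word] = 1
--     return outer_dict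
-- ===== SOURCE B (Python) =====
-- def build_bigrams(lines):
--     # pass 1: flatten to the list of consecutive (prev, cur) pairs, each line
--     # starting from the '::END::' sentinel (line is extended in place, like A)
--     pairs = []
--     for line in lines:
--         line.append('::END::')
--         pairs.extend(zip(['::END::'] + line, line))
--     # pass 2: aggregate the pair list into the nested count dictionary
--     outer_dict = {}
--     for prev, cur in pairs:
--         inner = outer_dict.setdefault((prev,), {})
--         inner[cur] = inner.get(cur, 0) + 1
--     return outer_dict
-- ===== Notes on version B (the rewrite author's own statement) =====
-- stated objective: alternative
-- what changed: A interleaves pair enumeration and counting in one nested loop with a threaded old_word and a double membership re-check; B first flattens all lines into a list of (prev, cur) bigram pairs via zip with the sentinel-prefixed line, then aggregates that flat list into the nested dict in a separate pass using setdefault/get.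
import Mathlib
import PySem

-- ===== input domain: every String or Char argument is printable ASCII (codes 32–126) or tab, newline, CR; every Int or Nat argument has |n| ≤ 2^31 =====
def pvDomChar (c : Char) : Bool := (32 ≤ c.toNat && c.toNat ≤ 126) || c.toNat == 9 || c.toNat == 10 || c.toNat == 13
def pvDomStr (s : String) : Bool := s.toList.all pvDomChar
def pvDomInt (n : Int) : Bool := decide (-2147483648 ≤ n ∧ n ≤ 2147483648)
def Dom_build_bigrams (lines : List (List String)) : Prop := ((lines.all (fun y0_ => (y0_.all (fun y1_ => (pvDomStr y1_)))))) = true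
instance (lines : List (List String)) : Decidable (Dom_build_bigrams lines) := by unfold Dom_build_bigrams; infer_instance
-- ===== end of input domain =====

-- B splits A's interleaved nested loop into two passes: enumerate all bigram pairs, then aggregate.
-- Equivalence is about the return value; both Pythons also append '::END::' to each line in place.

-- ===== PORT A =====
def pvEND : String := "::END::"

-- A's inner-loop body: state is (outer_dict, old_word)
def pvAStep (st : PySem.Dict (List String) (PySem.Dict String Int) × String) (word : String) :
    PySem.Dict (List String) (PySem.Dict String Int) × String :=
  let first := st.2
  let d := st.1
  let d := if d.contains [first] then d else d.insert [first] PySem.Dict.empty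
  let d := if (d.getD [first] PySem.Dict.empty).contains word then
             d.insert [first] ((d.getD [first] PySem.Dict.empty).insert word
               ((d.getD [first] PySem.Dict.empty).getD word 0 + 1))
           else d
  let d := if (d.getD [first] PySem.Dict.empty).contains word then d
           else d.insert [first] ((d.getD [first] PySem.Dict.empty).insert word 1)
  (d, word)

def build_bigrams (lines : List (List String)) : List (List String × List (String × Int)) :=
  ((lines.foldl (fun d line => ((line ++ [pvEND]).foldl pvAStep (d, pvEND)).1)
      PySem.Dict.empty).items.map (fun p => (p.1, p.2.items)))

-- ===== PORT B =====
-- pass 1: the flat list of (prev, cur) pairs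
def pvBPairs (lines : List (List String)) : List (String × String) :=
  lines.foldl (fun acc line =>
    let lw := line ++ [pvEND]
    acc ++ (pvEND :: lw).zip lw) []

-- pass 2 body: outer_dict.setdefault((prev,), {}); inner[cur] = inner.get(cur, 0) + 1
def pvBStep (d : PySem.Dict (List String) (PySem.Dict String Int)) (pr : String × String) :
    PySem.Dict (List String) (PySem.Dict String Int) :=
  let d := d.setdefault [pr.1] PySem.Dict.empty
  let inner := d.getD [pr.1] PySem.Dict.empty
  d.insert [pr.1] (inner.insert pr.2 (inner.getD pr.2 0 + 1))

def build_bigrams_alt (lines : List (List String)) : List (List String × List (String × Int)) :=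
  (((pvBPairs lines).foldl pvBStep PySem.Dict.empty).items.map (fun p => (p.1, p.2.items)))

-- ===== PRECONDITION & SPEC =====
def Spec_build_bigrams (lines : List (List String)) (out : List (List String × List (String × Int))) : Prop := out = build_bigrams_alt lines
instance (lines : List (List String)) (out : List (List String × List (String × Int))) : Decidable (Spec_build_bigrams lines out) := by unfold Spec_build_bigrams; infer_instance

-- ===== CLAIM (what is proved, stated in full; the proofs are below) =====
def Claim_equal_build_bigrams : Prop := ∀ (lines : List (List String)), Dom_build_bigrams lines → Spec_build_bigrams lines (build_bigrams lines)

-- ===== LEMMAS AND PROOFS =====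

-- A's one update step equals B's aggregation step
theorem pvStep_eq (d : PySem.Dict (List String) (PySem.Dict String Int)) (old w : String) :
    pvAStep (d, old) w = (pvBStep d (old, w), w) := by
  unfold pvAStep pvBStep
  by_cases hk : d.contains [old]
  · rw [PySem.Dict.setdefault_of_contains _ _ hk]
    simp only [hk, if_true]
    by_cases hw : (d.getD [old] PySem.Dict.empty).contains w
    · simp [hw, PySem.Dict.getD_insert_self, PySem.Dict.contains_insert_self]
    · rw [show (d.getD [old] PySem.Dict.empty).getD w 0 = 0 from
        PySem.Dict.getD_of_not_contains _ _ (by simpa using hw)]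
      simp [hw]
  · rw [PySem.Dict.setdefault_of_not_contains _ _ (by simpa using hk)]
    simp [hk, PySem.Dict.getD_insert_self, PySem.Dict.insert_insert_self,
      PySem.Dict.getD_of_not_contains]

-- A's inner loop over ws starting from old equals folding B's step over the pair list
theorem pvInner_eq (ws : List String) (old : String)
    (d : PySem.Dict (List String) (PySem.Dict String Int)) :
    (ws.foldl pvAStep (d, old)).1 = ((old :: ws).zip ws).foldl pvBStep d := by
  induction ws generalizing old d with
  | nil => rfl
  | cons w ws ih =>
      simp only [List.foldl_cons, List.zip_cons_cons, pvStep_eq]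
      exact ih w (pvBStep d (old, w))

-- B's pair list is accumulated by appending per-line chunks
theorem pvBPairs_acc (lines : List (List String)) (acc : List (String × String)) :
    lines.foldl (fun acc line =>
      let lw := line ++ [pvEND]
      acc ++ (pvEND :: lw).zip lw) acc
    = acc ++ lines.flatMap (fun line =>
        let lw := line ++ [pvEND]
        (pvEND :: lw).zip lw) := by
  induction lines generalizing acc with
  | nil => simp
  | cons l ls ih => simp [ih, List.flatMap_cons]

-- folding over a flattened list is the nested fold
theorem pvFold_flat (lines : List (List String))
    (d : PySem.Dict (List String) (PySem.Dict String Int)) :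
    (lines.flatMap (fun line =>
        let lw := line ++ [pvEND]
        (pvEND :: lw).zip lw)).foldl pvBStep d
    = lines.foldl (fun d line =>
        let lw := line ++ [pvEND]
        ((pvEND :: lw).zip lw).foldl pvBStep d) d := by
  induction lines generalizing d with
  | nil => rfl
  | cons l ls ih => simp [List.flatMap_cons, List.foldl_append, ih]

-- ===== VERDICT (by name: the statement is the Claim_ definition above) =====
theorem build_bigrams_spec : Claim_equal_build_bigrams := by
  intro lines _
  unfold Spec_build_bigrams build_bigrams build_bigrams_alt pvBPairs
  rw [pvBPairs_acc, List.nil_append, pvFold_flat]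
  have hf : (fun (d : PySem.Dict (List String) (PySem.Dict String Int)) line =>
      ((line ++ [pvEND]).foldl pvAStep (d, pvEND)).1)
      = (fun d line =>
          let lw := line ++ [pvEND]
          ((pvEND :: lw).zip lw).foldl pvBStep d) := by
    funext d line
    exact pvInner_eq (line ++ [pvEND]) pvEND d
  rw [hf]
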